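-- pv_equiv track=rewrite | github.com/Himanshu6513/whatsapp_ai_agent_old | whatsapp.py | split_message_dynamic
-- ===== SOURCE A (Python) =====
-- def split_message_dynamic(message, max_length=1600):
--     chunks = []
--     while len(message) > max_length:
--         # Find the last split point within the limit
--         split_point = max_length
--         while split_point > 0 and message[split_point] not in ['.','?', '!']:
--             split_point -= 1
--
--         # If no split point is found, split at max_length
--         if split_point == 0:
--             split_point = max_length
--
--         # Take the chunk up to the split point
--         chunks.append(message[:split_point].strip())
--         message = message[split_point:].strip()
--
--     # Add the remaining message as the last chunk
--     if message:
--         chunks.append(message)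
--
--     return chunks
-- ===== SOURCE B (Python) =====
-- def split_message_dynamic(message, max_length=1600):
--     # Single pass over the original string using integer indices and rfind;
--     # no repeated slicing/stripping of the remainder.
--     chunks = []
--     start, end = 0, len(message)
--     first = True
--     while end - start > max_length:
--         hi = start + max_length + 1
--         cut = max(message.rfind('.', start + 1, hi),
--                   message.rfind('?', start + 1, hi),
--                   message.rfind('!', start + 1, hi))
--         if cut == -1:
--             cut = start + max_length
--         chunks.append(message[start:cut].strip())
--         start = cut
--         if first:
--             end = len(message.rstrip())
--             first = False
--         while start < end and message[start].isspace():
--             start += 1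
--     if start < end:
--         chunks.append(message[start:end])
--     return chunks
-- ===== Notes on version B (the rewrite author's own statement) =====
-- stated objective: faster
-- what changed: B makes a single pass over the original string with an integer start index, an effective end index (rstrip computed once) and str.rfind to locate the split punctuation, instead of A's repeated slicing/stripping of the shrinking remainder and per-chunk backward character scan.
import Mathlib
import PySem

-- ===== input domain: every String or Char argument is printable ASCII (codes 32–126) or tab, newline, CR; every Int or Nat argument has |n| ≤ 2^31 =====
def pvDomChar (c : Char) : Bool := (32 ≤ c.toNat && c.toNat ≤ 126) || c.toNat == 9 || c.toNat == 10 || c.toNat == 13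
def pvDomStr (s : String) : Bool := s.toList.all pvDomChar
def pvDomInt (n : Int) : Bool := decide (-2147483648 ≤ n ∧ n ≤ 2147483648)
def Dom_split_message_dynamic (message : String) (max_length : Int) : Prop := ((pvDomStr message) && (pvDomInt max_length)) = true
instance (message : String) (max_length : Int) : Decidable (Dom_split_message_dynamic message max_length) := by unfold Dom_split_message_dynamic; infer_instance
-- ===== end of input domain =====

-- B replaces A's repeated slicing/stripping of the remainder and per-chunk backward scan by one
-- pass over the original string with integer indices and rfind (objective: faster, single pass).

-- ===== PORT A =====
def pvPunct (c : Char) : Bool := c == '.' || c == '?' || c == '!'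

-- inner `while split_point > 0 and message[split_point] not in ['.','?','!']`
def pvScanA (msg : List Char) : Nat → Nat
  | 0 => 0
  | j+1 => if pvPunct (msg.getD (j+1) ' ') then j + 1 else pvScanA msg j

-- outer `while len(message) > max_length` (fuel: the remainder shrinks every iteration)
def pvLoopA (m : Nat) : Nat → List Char → List (List Char)
  | 0, _ => []
  | fuel+1, msg =>
    if msg.length > m then
      let sp0 := pvScanA msg m
      let sp := if sp0 = 0 then m else sp0
      PySem.Chars.strip (msg.take sp) :: pvLoopA m fuel (PySem.Chars.strip (msg.drop sp))
    else if msg.isEmpty then [] else [msg]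

def split_message_dynamic (message : String) (max_length : Int) : List String :=
  (pvLoopA max_length.toNat (message.toList.length + 1) message.toList).map String.ofList

-- ===== PORT B =====
-- `while start < end and message[start].isspace(): start += 1`
def pvSkipWs (s : List Char) (endi : Nat) (start : Nat) : Nat :=
  if h : start < endi ∧ PySem.Chars.isspace (s.getD start ' ') = true then
    pvSkipWs s endi (start + 1)
  else start
termination_by endi - start
decreasing_by omega

-- `while end - start > max_length` of Source B (fuel: start advances every iteration)
def pvLoopB (s : List Char) (m : Nat) : Nat → Nat → Nat → Bool → List (List Char)
  | 0, _, _, _ => []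
  | fuel+1, start, endi, first =>
    if endi - start > m then
      let r := max (PySem.Chars.rfindFrom s ['.'] ((start : Int) + 1) (some ((start : Int) + (m : Int) + 1)))
               (max (PySem.Chars.rfindFrom s ['?'] ((start : Int) + 1) (some ((start : Int) + (m : Int) + 1)))
                    (PySem.Chars.rfindFrom s ['!'] ((start : Int) + 1) (some ((start : Int) + (m : Int) + 1))))
      let cut : Nat := if r = -1 then start + m else r.toNat
      let endi' := if first then (PySem.Chars.rstrip s).length else endi
      PySem.Chars.strip ((s.drop start).take (cut - start)) ::
        pvLoopB s m fuel (pvSkipWs s endi' cut) endi' false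
    else if start < endi then [(s.drop start).take (endi - start)] else []

def split_message_dynamic_alt (message : String) (max_length : Int) : List String :=
  (pvLoopB message.toList max_length.toNat (message.toList.length + 1) 0 message.toList.length true).map String.ofList

-- ===== PRECONDITION & SPEC =====
-- Pre_ excludes exactly the inputs on which A never returns (infinite loop): max_length < 0 always
-- loops, and max_length = 0 loops unless the message is empty or all whitespace (then A returns).
def Pre_split_message_dynamic (message : String) (max_length : Int) : Prop :=
  1 ≤ max_length ∨ (max_length = 0 ∧ message.toList.all PySem.Chars.isspace = true)
instance (message : String) (max_length : Int) : Decidable (Pre_split_message_dynamic message max_length) := by unfold Pre_split_message_dynamic; infer_instance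

def pvWitness_split_message_dynamic : String × Int := ("Hi there. How are you?", 10)

def Spec_split_message_dynamic (message : String) (max_length : Int) (out : List String) : Prop := out = split_message_dynamic_alt message max_length
instance (message : String) (max_length : Int) (out : List String) : Decidable (Spec_split_message_dynamic message max_length out) := by unfold Spec_split_message_dynamic; infer_instance

-- ===== CLAIM (what is proved, stated in full; the proofs are below) =====
def Claim_equal_split_message_dynamic : Prop := ∀ (message : String) (max_length : Int), Dom_split_message_dynamic message max_length → Pre_split_message_dynamic message max_length → Spec_split_message_dynamic message max_length (split_message_dynamic message max_length)

-- ===== LEMMAS AND PROOFS =====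

-- ---- small index facts ----
lemma pv_getD_drop_take (s : List Char) (a k i : Nat) (hik : i < k) (hlen : a + i < s.length) :
    ((s.drop a).take k).getD i ' ' = s.getD (a + i) ' ' := by
  have h1 : i < ((s.drop a).take k).length := by
    simp [List.length_take, List.length_drop]; omega
  rw [List.getD_eq_getElem _ _ h1, List.getD_eq_getElem _ _ hlen]
  simp [List.getElem_take, List.getElem_drop]

-- ---- rfind.go facts ----
lemma pv_go_le (w sub : List Char) : ∀ j : Nat, PySem.Chars.rfind.go w sub j ≤ (j : Int) := by
  intro j
  induction j with
  | zero => simp [PySem.Chars.rfind.go]; split <;> simp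
  | succ n ih => simp [PySem.Chars.rfind.go]; split <;> omega

lemma pv_neg_one_le_go (w sub : List Char) : ∀ j : Nat, -1 ≤ PySem.Chars.rfind.go w sub j := by
  intro j
  induction j with
  | zero => simp [PySem.Chars.rfind.go]; split <;> simp
  | succ n ih => simp [PySem.Chars.rfind.go]; split <;> omega

lemma pv_prefix_single (c : Char) (w : List Char) (j : Nat) (h : j < w.length) :
    [c].isPrefixOf (w.drop j) = (w.getD j ' ' == c) := by
  rw [List.drop_eq_getElem_cons h]
  simp [List.isPrefixOf, BEq.comm, List.getD, List.getElem?_eq_getElem h]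

-- ---- rstrip / lstrip / strip facts ----
lemma pv_rstrip_prefix (l : List Char) : PySem.Chars.rstrip l <+: l := by
  have := List.dropWhile_suffix (l := l.reverse) (p := PySem.Chars.isspace)
  simpa [PySem.Chars.rstrip] using this.reverse

lemma pv_rstrip_length_le (l : List Char) : (PySem.Chars.rstrip l).length ≤ l.length := by
  exact (pv_rstrip_prefix l).length_le

lemma pv_rstrip_eq_take (l : List Char) :
    PySem.Chars.rstrip l = l.take (PySem.Chars.rstrip l).length := by
  exact List.prefix_iff_eq_take.mp (pv_rstrip_prefix l)

lemma pv_ws_drop_rstrip (l : List Char) :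
    ∀ x ∈ l.drop (PySem.Chars.rstrip l).length, PySem.Chars.isspace x = true := by
  intro x hx
  have hdecomp : l = PySem.Chars.rstrip l ++ (l.reverse.takeWhile PySem.Chars.isspace).reverse := by
    rw [PySem.Chars.rstrip, ← List.reverse_append, List.takeWhile_append_dropWhile]
    simp
  have h2 := congrArg (List.drop (PySem.Chars.rstrip l).length) hdecomp
  rw [List.drop_left] at h2
  rw [h2] at hx
  exact List.mem_takeWhile_imp (List.mem_reverse.mp hx)

lemma pv_last_rstrip (l : List Char) (h : PySem.Chars.rstrip l ≠ []) :
    PySem.Chars.isspace ((PySem.Chars.rstrip l).getLast h) = false := by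
  simp only [PySem.Chars.rstrip] at h ⊢
  have hne : List.dropWhile PySem.Chars.isspace l.reverse ≠ [] := by simpa using h
  rw [List.getLast_reverse]
  exact List.head_dropWhile_not PySem.Chars.isspace hne

lemma pv_rstrip_append_ws (l t : List Char) (h : ∀ x ∈ t, PySem.Chars.isspace x = true) :
    PySem.Chars.rstrip (l ++ t) = PySem.Chars.rstrip l := by
  have ht : t.reverse.dropWhile PySem.Chars.isspace = [] :=
    List.dropWhile_eq_nil_iff.mpr (by intro x hx; exact h x (List.mem_reverse.mp hx))
  simp [PySem.Chars.rstrip, List.dropWhile_append, ht]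

lemma pv_rstrip_eq_self (l : List Char) (h : ∀ (hne : l ≠ []), PySem.Chars.isspace (l.getLast hne) = false) :
    PySem.Chars.rstrip l = l := by
  rw [PySem.Chars.rstrip]
  rcases hrev : l.reverse with _ | ⟨a, t⟩
  · simp [List.reverse_eq_nil_iff.mp hrev]
  · have hne : l ≠ [] := by intro hl; rw [hl] at hrev; simp at hrev
    have ha : a = l.getLast hne := by
      have h3 : l = t.reverse ++ [a] := by
        have := congrArg List.reverse hrev; simpa using this
      simp [h3]
    rw [List.dropWhile_cons_of_neg (by simp [ha, h hne])]
    rw [← hrev]; simp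

lemma pv_rstrip_all_ws (l : List Char) (h : ∀ x ∈ l, PySem.Chars.isspace x = true) :
    PySem.Chars.rstrip l = [] := by
  rw [PySem.Chars.rstrip]
  simp only [List.reverse_eq_nil_iff, List.dropWhile_eq_nil_iff]
  intro x hx; exact h x (List.mem_reverse.mp hx)

lemma pv_strip_comm (l : List Char) :
    PySem.Chars.strip l = PySem.Chars.lstrip (PySem.Chars.rstrip l) := by
  rw [PySem.Chars.strip]
  by_cases hall : List.dropWhile PySem.Chars.isspace l = []
  · have hws : ∀ x ∈ l, PySem.Chars.isspace x = true := List.dropWhile_eq_nil_iff.mp hall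
    have hr : PySem.Chars.rstrip l = [] := pv_rstrip_all_ws l hws
    rw [hr, PySem.Chars.lstrip, hall]
    simp [PySem.Chars.rstrip, PySem.Chars.lstrip]
  · set u := List.takeWhile PySem.Chars.isspace l with hu
    set d := List.dropWhile PySem.Chars.isspace l with hd
    have hl : l = u ++ d := (List.takeWhile_append_dropWhile).symm
    have hdhead : PySem.Chars.isspace (d.head hall) = false :=
      List.head_dropWhile_not PySem.Chars.isspace hall
    have hdrev : List.dropWhile PySem.Chars.isspace d.reverse ≠ [] := by
      intro hc
      have h2 := List.dropWhile_eq_nil_iff.mp hc _ (List.mem_reverse.mpr (List.head_mem hall))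
      rw [hdhead] at h2; exact absurd h2 (by simp)
    have hru : PySem.Chars.rstrip l = u ++ PySem.Chars.rstrip d := by
      rw [PySem.Chars.rstrip, PySem.Chars.rstrip]
      conv_lhs => rw [hl]
      rw [List.reverse_append, List.dropWhile_append]
      simp only [List.isEmpty_iff, if_neg hdrev]
      rw [List.reverse_append, List.reverse_reverse]
    have hlstrip : PySem.Chars.lstrip l = d := by rw [PySem.Chars.lstrip]
    rw [hru, hlstrip, PySem.Chars.lstrip]
    have hu_ws : List.dropWhile PySem.Chars.isspace u = [] := by
      simp only [List.dropWhile_eq_nil_iff]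
      intro x hx; exact List.mem_takeWhile_imp hx
    rw [List.dropWhile_append, hu_ws]
    simp only [List.isEmpty_nil]
    have hrd_ne : PySem.Chars.rstrip d ≠ [] := by
      rw [PySem.Chars.rstrip]; simpa using hdrev
    have hhead : (PySem.Chars.rstrip d).head? = d.head? := by
      obtain ⟨t2, ht2⟩ := pv_rstrip_prefix d
      conv_rhs => rw [← ht2]
      exact (List.head?_append_of_ne_nil _ hrd_ne).symm
    rcases hrde : PySem.Chars.rstrip d with _ | ⟨a, t⟩
    · exact absurd hrde hrd_ne
    · rw [List.dropWhile_cons_of_neg]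
      · simp
      · rw [hrde] at hhead
        have hd2 : d.head? = some a := by rw [← hhead]; rfl
        have hd3 : d.head hall = a := by
          rw [List.head?_eq_some_head hall] at hd2; exact Option.some_injective _ hd2
        rw [← hd3, hdhead]; simp

lemma pv_rstrip_drop (l : List Char) (c : Nat) :
    PySem.Chars.rstrip (l.drop c) = (l.drop c).take ((PySem.Chars.rstrip l).length - c) := by
  by_cases hc : c ≤ (PySem.Chars.rstrip l).length
  · have hRlen : (PySem.Chars.rstrip l).length ≤ l.length := pv_rstrip_length_le l
    have hsplit : l.drop c = (PySem.Chars.rstrip l).drop c ++ l.drop (PySem.Chars.rstrip l).length := by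
      conv_lhs => rw [← List.take_append_drop (PySem.Chars.rstrip l).length l]
      rw [List.drop_append_of_le_length (by simpa [hRlen] using hc), ← pv_rstrip_eq_take]
    have h2 : PySem.Chars.rstrip ((PySem.Chars.rstrip l).drop c) = (PySem.Chars.rstrip l).drop c := by
      apply pv_rstrip_eq_self
      intro hne
      rw [List.getLast_drop]
      exact pv_last_rstrip l (by intro h0; rw [h0] at hne; simp at hne)
    conv_lhs => rw [hsplit]
    rw [pv_rstrip_append_ws _ _ (pv_ws_drop_rstrip l), h2]
    conv_lhs => rw [pv_rstrip_eq_take l]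
    rw [List.drop_take]
  · have h0 : (PySem.Chars.rstrip l).length - c = 0 := by omega
    rw [h0, List.take_zero]
    apply pv_rstrip_all_ws
    intro x hx
    apply pv_ws_drop_rstrip l
    have h3 : l.drop c = (l.drop (PySem.Chars.rstrip l).length).drop (c - (PySem.Chars.rstrip l).length) := by
      rw [List.drop_drop]; congr 1; omega
    rw [h3] at hx
    exact List.mem_of_mem_drop hx

-- ---- pvSkipWs spec ----
lemma pv_skipWs_spec (s : List Char) (e : Nat) (he : e ≤ s.length) : ∀ c : Nat,
    PySem.Chars.lstrip ((s.drop c).take (e - c))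
      = (s.drop (pvSkipWs s e c)).take (e - pvSkipWs s e c)
    ∧ (pvSkipWs s e c < e → PySem.Chars.isspace (s.getD (pvSkipWs s e c) ' ') = false)
    ∧ c ≤ pvSkipWs s e c := by
  intro c
  induction c using pvSkipWs.induct s e with
  | case1 c h ih =>
    rw [pvSkipWs, dif_pos h]
    obtain ⟨h1, h2⟩ := h
    have hcl : c < s.length := by omega
    have hcons : (s.drop c).take (e - c) = s.getD c ' ' :: (s.drop (c+1)).take (e - (c+1)) := by
      rw [List.getD_eq_getElem _ _ hcl, List.drop_eq_getElem_cons hcl]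
      have h3 : e - c = (e - (c+1)) + 1 := by omega
      rw [h3, List.take_succ_cons]
    rw [hcons, PySem.Chars.lstrip, List.dropWhile_cons_of_pos h2, ← PySem.Chars.lstrip]
    exact ⟨ih.1, ih.2.1, by omega⟩
  | case2 c h =>
    rw [pvSkipWs, dif_neg h]
    push_neg at h
    simp only [ne_eq, Bool.not_eq_true] at h
    refine ⟨?_, ?_, le_refl c⟩
    · by_cases hce : c < e
      · have h2 := h hce
        have hcl : c < s.length := by omega
        have hcons : (s.drop c).take (e - c) = s.getD c ' ' :: (s.drop (c+1)).take (e - (c+1)) := by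
          rw [List.getD_eq_getElem _ _ hcl, List.drop_eq_getElem_cons hcl]
          have h3 : e - c = (e - (c+1)) + 1 := by omega
          rw [h3, List.take_succ_cons]
        rw [hcons, PySem.Chars.lstrip, List.dropWhile_cons_of_neg (by simpa using h2), ← hcons]
      · have h4 : e - c = 0 := by omega
        simp [h4, PySem.Chars.lstrip]
    · intro hce; exact h hce

-- ---- the cut point: A's backward scan = B's rfind max ----
lemma pv_scanA_le (msg : List Char) : ∀ k : Nat, pvScanA msg k ≤ k := by
  intro k
  induction k with
  | zero => simp [pvScanA]
  | succ n ih => simp only [pvScanA]; split <;> omega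

lemma pv_go_scan (w seg : List Char) (m : Nat) (hw : w.length = m)
    (hchar : ∀ j, j < m → w.getD j ' ' = seg.getD (j + 1) ' ') :
    ∀ k, k < m →
      max (PySem.Chars.rfind.go w ['.'] k)
          (max (PySem.Chars.rfind.go w ['?'] k) (PySem.Chars.rfind.go w ['!'] k))
        = if pvScanA seg (k + 1) = 0 then (-1 : Int) else ((pvScanA seg (k + 1) : Int) - 1) := by
  intro k
  induction k with
  | zero =>
    intro hk
    have h0 : (0 : Nat) < w.length := by omega
    have hdw : w.drop 0 = w := List.drop_zero
    have hpre : ∀ c : Char, ([c]).isPrefixOf w = (w.getD 0 ' ' == c) := by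
      intro c; rw [← hdw]; exact pv_prefix_single c w 0 h0
    have hseg : seg.getD 1 ' ' = w.getD 0 ' ' := (hchar 0 hk).symm
    simp only [PySem.Chars.rfind.go, hpre, pvScanA, hseg, pvPunct]
    by_cases h1 : w[0]?.getD ' ' = '.' <;> by_cases h2 : w[0]?.getD ' ' = '?' <;>
      by_cases h3 : w[0]?.getD ' ' = '!' <;> simp_all
  | succ n ih =>
    intro hk
    have hn : n < m := by omega
    have hlt : n + 1 < w.length := by omega
    have hpre : ∀ c : Char, ([c]).isPrefixOf (w.drop (n+1)) = (w.getD (n+1) ' ' == c) :=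
      fun c => pv_prefix_single c w (n+1) hlt
    have hseg : seg.getD (n+2) ' ' = w.getD (n+1) ' ' := (hchar (n+1) hk).symm
    have hih := ih hn
    simp only [PySem.Chars.rfind.go, hpre]
    have hscan : pvScanA seg (n+2) = if pvPunct (seg.getD (n+2) ' ') then n + 2 else pvScanA seg (n+1) := rfl
    rw [hscan, hseg]
    have hgd : PySem.Chars.rfind.go w ['.'] n ≤ (n : Int) := pv_go_le w ['.'] n
    have hgq : PySem.Chars.rfind.go w ['?'] n ≤ (n : Int) := pv_go_le w ['?'] n
    have hgb : PySem.Chars.rfind.go w ['!'] n ≤ (n : Int) := pv_go_le w ['!'] n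
    by_cases h1 : w.getD (n+1) ' ' = '.' <;> by_cases h2 : w.getD (n+1) ' ' = '?' <;>
      by_cases h3 : w.getD (n+1) ' ' = '!' <;>
      simp only [h1, h2, h3, pvPunct, beq_iff_eq, if_true, if_false, beq_self_eq_true] <;>
      simp_all <;> omega


lemma pv_rfind_single_top (w : List Char) (c : Char) (m : Nat) (hw : w.length = m) (hm : 1 ≤ m) :
    PySem.Chars.rfind w [c] = PySem.Chars.rfind.go w [c] (m - 1) := by
  rw [PySem.Chars.rfind, hw]
  obtain ⟨m', rfl⟩ : ∃ m', m = m' + 1 := ⟨m - 1, by omega⟩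
  have hnil : w.drop (m' + 1) = [] := List.drop_eq_nil_of_le (by omega)
  simp only [PySem.Chars.rfind.go, hnil, Nat.add_sub_cancel]
  simp [List.isPrefixOf]

lemma pv_cut_eq (s : List Char) (m start endi : Nat) (hm : 1 ≤ m)
    (hlt : start + m < endi) (he : endi ≤ s.length) :
    (if max (PySem.Chars.rfindFrom s ['.'] ((start : Int) + 1) (some ((start : Int) + (m : Int) + 1)))
          (max (PySem.Chars.rfindFrom s ['?'] ((start : Int) + 1) (some ((start : Int) + (m : Int) + 1)))
               (PySem.Chars.rfindFrom s ['!'] ((start : Int) + 1) (some ((start : Int) + (m : Int) + 1)))) = -1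
     then start + m
     else (max (PySem.Chars.rfindFrom s ['.'] ((start : Int) + 1) (some ((start : Int) + (m : Int) + 1)))
          (max (PySem.Chars.rfindFrom s ['?'] ((start : Int) + 1) (some ((start : Int) + (m : Int) + 1)))
               (PySem.Chars.rfindFrom s ['!'] ((start : Int) + 1) (some ((start : Int) + (m : Int) + 1))))).toNat)
      = start + (if pvScanA ((s.drop start).take (endi - start)) m = 0 then m
                 else pvScanA ((s.drop start).take (endi - start)) m) := by
  have hw : ((s.drop (start+1)).take m).length = m := by
    simp [List.length_take, List.length_drop]; omega
  have hchar : ∀ j, j < m → ((s.drop (start+1)).take m).getD j ' '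
      = ((s.drop start).take (endi - start)).getD (j+1) ' ' := by
    intro j hj
    rw [pv_getD_drop_take s (start+1) m j hj (by omega),
        pv_getD_drop_take s start (endi - start) (j+1) (by omega) (by omega)]
    congr 1; omega
  have hrf : ∀ c : Char, PySem.Chars.rfindFrom s [c] ((start : Int) + 1) (some ((start : Int) + (m : Int) + 1))
      = (if PySem.Chars.rfind.go ((s.drop (start+1)).take m) [c] (m-1) = -1 then -1
         else ((start : Int) + 1) + PySem.Chars.rfind.go ((s.drop (start+1)).take m) [c] (m-1)) := by
    intro c
    rw [PySem.Chars.rfindFrom]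
    have h1 : ¬((s.length : Int) < (start : Int) + (m : Int) + 1) := by push_neg; omega
    rw [if_neg h1, if_neg (by omega : ¬((start : Int) + (m : Int) + 1 < 0)),
        if_neg (by omega : ¬((start : Int) + 1 < 0)),
        if_neg (by omega : ¬((start : Int) + (m : Int) + 1 < (start : Int) + 1))]
    have ht1 : ((start : Int) + 1).toNat = start + 1 := by omega
    have ht2 : ((start : Int) + (m : Int) + 1).toNat = start + m + 1 := by omega
    rw [ht1, ht2]
    have hdt : (s.take (start + m + 1)).drop (start + 1) = (s.drop (start+1)).take m := by
      rw [List.drop_take]; congr 1; omega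
    rw [hdt, pv_rfind_single_top _ c m hw hm]
  rw [hrf '.', hrf '?', hrf '!']
  have hgs := pv_go_scan ((s.drop (start+1)).take m) ((s.drop start).take (endi - start)) m hw hchar
      (m-1) (by omega)
  rw [Nat.sub_add_cancel hm] at hgs
  set g1 := PySem.Chars.rfind.go ((s.drop (start+1)).take m) ['.'] (m-1) with hg1
  set g2 := PySem.Chars.rfind.go ((s.drop (start+1)).take m) ['?'] (m-1) with hg2
  set g3 := PySem.Chars.rfind.go ((s.drop (start+1)).take m) ['!'] (m-1) with hg3
  set sp0 := pvScanA ((s.drop start).take (endi - start)) m with hsp0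
  have hb1 := pv_neg_one_le_go ((s.drop (start+1)).take m) ['.'] (m-1)
  have hb2 := pv_neg_one_le_go ((s.drop (start+1)).take m) ['?'] (m-1)
  have hb3 := pv_neg_one_le_go ((s.drop (start+1)).take m) ['!'] (m-1)
  rw [← hg1] at hb1; rw [← hg2] at hb2; rw [← hg3] at hb3
  have hsple := pv_scanA_le ((s.drop start).take (endi - start)) m
  rw [← hsp0] at hsple
  by_cases hsp : sp0 = 0
  · rw [if_pos hsp] at hgs
    have h1 : g1 = -1 := by omega
    have h2 : g2 = -1 := by omega
    have h3 : g3 = -1 := by omega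
    rw [h1, h2, h3, hsp]
    simp
  · rw [if_neg hsp] at hgs
    have hcomb : max (if g1 = -1 then -1 else (start : Int) + 1 + g1)
        (max (if g2 = -1 then -1 else (start : Int) + 1 + g2)
             (if g3 = -1 then -1 else (start : Int) + 1 + g3)) = (start : Int) + sp0 := by
      split_ifs <;> omega
    rw [hcomb, if_neg (by omega), if_neg hsp]
    omega


-- ---- the main simulation ----
lemma pv_loop_sim (s : List Char) (m : Nat) (hm : 1 ≤ m) :
    ∀ (fuel start endi : Nat) (first : Bool),
      endi ≤ s.length →
      (first = true → start = 0 ∧ endi = s.length) →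
      (first = false → endi = (PySem.Chars.rstrip s).length ∧
          (start < endi → PySem.Chars.isspace (s.getD start ' ') = false)) →
      pvLoopA m fuel ((s.drop start).take (endi - start)) = pvLoopB s m fuel start endi first := by
  intro fuel
  induction fuel with
  | zero => intro start endi first _ _ _; rfl
  | succ fuel ih =>
    intro start endi first hend hfT hfF
    have hseglen : ((s.drop start).take (endi - start)).length = endi - start := by
      simp [List.length_take, List.length_drop]; omega
    by_cases hcond : endi - start > m
    · -- loop body
      have hlt : start + m < endi := by omega
      rw [pvLoopA, pvLoopB, if_pos (by rw [hseglen]; exact hcond), if_pos hcond]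
      simp only []
      rw [pv_cut_eq s m start endi hm hlt hend]
      set sp := (if pvScanA ((s.drop start).take (endi - start)) m = 0 then m
                 else pvScanA ((s.drop start).take (endi - start)) m) with hsp
      have hsp1 : 1 ≤ sp ∧ sp ≤ m := by
        have h1 := pv_scanA_le ((s.drop start).take (endi - start)) m
        rw [hsp]; split <;> omega
      set R := (PySem.Chars.rstrip s).length with hR
      have hRle : R ≤ s.length := pv_rstrip_length_le s
      have hendi' : (if first then (PySem.Chars.rstrip s).length else endi) = R := by
        cases first
        · rw [if_neg (by simp)]; exact (hfF rfl).1
        · rw [if_pos rfl]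
      rw [hendi']
      congr 1
      · -- chunk
        congr 1
        have h5 : min sp (endi - start) = start + sp - start := by omega
        rw [List.take_take, h5]
      · -- tail
        have hdrop : ((s.drop start).take (endi - start)).drop sp
            = (s.drop (start + sp)).take (endi - (start + sp)) := by
          rw [List.drop_take, List.drop_drop]
          have e1 : endi - start - sp = endi - (start + sp) := by omega
          rw [e1]
        have hrstep : PySem.Chars.rstrip (((s.drop start).take (endi - start)).drop sp)
            = (s.drop (start + sp)).take (R - (start + sp)) := by
          rw [hdrop]
          cases first
          · -- not first: endi = R, so the segment is already right-stripped
            have hendR : endi = R := (hfF rfl).1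
            rw [hendR]
            have hX : (s.drop (start + sp)).take (R - (start + sp))
                = (PySem.Chars.rstrip s).drop (start + sp) := by
              conv_rhs => rw [pv_rstrip_eq_take s]
              rw [List.drop_take]
            rw [hX]
            apply pv_rstrip_eq_self
            intro hne
            rw [List.getLast_drop]
            exact pv_last_rstrip s (by intro h0; rw [h0] at hne; simp at hne)
          · -- first: start = 0, endi = len
            have h1 : endi = s.length := (hfT rfl).2
            subst h1
            have h2 : (s.drop (start + sp)).take (s.length - (start + sp)) = s.drop (start + sp) := by
              apply List.take_of_length_le
              simp [List.length_drop]
            rw [h2, pv_rstrip_drop s (start + sp), hR]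
        have hskip := pv_skipWs_spec s R hRle (start + sp)
        rw [pv_strip_comm, hrstep, hskip.1]
        exact ih (pvSkipWs s R (start + sp)) R false hRle (by simp)
          (fun _ => ⟨rfl, hskip.2.1⟩)
    · -- exit
      rw [pvLoopA, pvLoopB, if_neg (by rw [hseglen]; exact hcond), if_neg hcond]
      by_cases hse : start < endi
      · have hNE : ¬(((s.drop start).take (endi - start)).isEmpty = true) := by
          rw [List.isEmpty_iff]
          intro h0
          have h1 := congrArg List.length h0
          rw [hseglen] at h1
          simp at h1
          omega
        rw [if_pos hse, if_neg hNE]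
      · have hE : ((s.drop start).take (endi - start)).isEmpty = true := by
          rw [List.isEmpty_iff]
          have h0 : endi - start = 0 := by omega
          simp [h0]
        rw [if_neg hse, if_pos hE]



lemma pv_zero_ws (s : List Char) (hws : s.all PySem.Chars.isspace = true) :
    pvLoopA 0 (s.length + 1) s = pvLoopB s 0 (s.length + 1) 0 s.length true := by
  cases s with
  | nil => rfl
  | cons a t =>
    have hwsl : ∀ x ∈ (a :: t), PySem.Chars.isspace x = true := by
      simpa [List.all_eq_true] using hws
    have hlstrip : List.dropWhile PySem.Chars.isspace (a :: t) = [] :=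
      List.dropWhile_eq_nil_iff.mpr hwsl
    have hstrip : PySem.Chars.strip (a :: t) = [] := by
      rw [PySem.Chars.strip, PySem.Chars.lstrip, hlstrip]
      simp [PySem.Chars.rstrip]
    have hR : (PySem.Chars.rstrip (a :: t)).length = 0 := by
      rw [pv_rstrip_all_ws _ hwsl]; rfl
    have hrfF : ∀ c : Char, PySem.Chars.rfindFrom (a :: t) [c] (((0 : Nat) : Int) + 1) (some (((0 : Nat) : Int) + ((0 : Nat) : Int) + 1)) = -1 := by
      intro c
      rw [PySem.Chars.rfindFrom]
      rw [if_neg (by simp : ¬(((a :: t).length : Int) < ((0 : Nat) : Int) + ((0 : Nat) : Int) + 1))]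
      rw [if_neg (by omega : ¬(((0 : Nat) : Int) + ((0 : Nat) : Int) + 1 < 0))]
      rw [if_neg (by omega : ¬(((0 : Nat) : Int) + 1 < 0))]
      rw [if_neg (by omega : ¬(((0 : Nat) : Int) + ((0 : Nat) : Int) + 1 < ((0 : Nat) : Int) + 1))]
      have h1 : (((0 : Nat) : Int) + ((0 : Nat) : Int) + 1).toNat = 1 := by omega
      have h2 : (((0 : Nat) : Int) + 1).toNat = 1 := by omega
      rw [h1, h2]
      have h3 : ((a :: t).take 1).drop 1 = [] := by simp
      rw [h3]
      simp [PySem.Chars.rfind, PySem.Chars.rfind.go, List.isPrefixOf]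
    -- A side: one iteration producing the empty chunk, then the remainder is empty
    rw [pvLoopA, if_pos (by simp)]
    have hA2 : pvLoopA 0 (t.length + 1) [] = [] := by
      rw [pvLoopA]
      simp
    -- B side
    rw [pvLoopB, if_pos (by simp)]
    simp only [hrfF]
    have hmax : max (-1 : Int) (max (-1 : Int) (-1 : Int)) = -1 := by decide
    have hskip : pvSkipWs (a :: t) 0 0 = 0 := by
      rw [pvSkipWs]
      simp
    have hB2 : pvLoopB (a :: t) 0 (t.length + 1) 0 0 false = [] := by
      rw [pvLoopB]
      simp
    have hsc : pvScanA (a :: t) 0 = 0 := rfl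
    rw [hsc, hmax]
    simp only [ite_self, ite_true, List.take_zero, List.drop_zero, Nat.add_zero, Nat.sub_zero,
      List.length_cons]
    rw [hstrip, hA2, hR, hskip, hB2]
-- ===== VERDICT (by name: the statement is the Claim_ definition above) =====
theorem split_message_dynamic_spec : Claim_equal_split_message_dynamic := by
  intro message max_length _hdom hpre
  show split_message_dynamic message max_length = split_message_dynamic_alt message max_length
  rw [split_message_dynamic, split_message_dynamic_alt]
  congr 1
  rcases hpre with h1 | ⟨h0, hws⟩
  · have hm : 1 ≤ max_length.toNat := by omega
    have hsim := pv_loop_sim message.toList max_length.toNat hm (message.toList.length + 1) 0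
      message.toList.length true (le_refl _) (fun _ => ⟨rfl, rfl⟩) (by simp)
    simp only [List.drop_zero, Nat.sub_zero, List.take_length] at hsim
    exact hsim
  · rw [h0]
    exact pv_zero_ws message.toList hws
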